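-- pv_equiv track=rewrite | github.com/vsrin008/CS170 | ActivityM3/activity_m3.py | valid_state
-- ===== SOURCE A (Python) =====
-- def valid_state(state, rows, cols):
--     for i in range(rows):
--         for j in range(cols):
--             if state[i][j] == 1:  # talking
--                 # check adjacent cells
--                 for dx, dy in [(-1, 0), (1, 0), (0, -1), (0, 1)]:
--                     nx, ny = i + dx, j + dy
--                     if 0 <= nx < rows and 0 <= ny < cols and state[nx][ny] == 1:
--                         return False
--     return True
-- ===== SOURCE B (Python) =====
-- def valid_state(state, rows, cols):
--     # Edge-based check: each orthogonal adjacency is inspected exactly once,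
--     # as a horizontal pass over consecutive columns then a vertical pass over
--     # consecutive rows.
--     for i in range(rows):
--         row = state[i]
--         for j in range(cols - 1):
--             if row[j] == 1 and row[j + 1] == 1:
--                 return False
--     for i in range(rows - 1):
--         for j in range(cols):
--             if state[i][j] == 1 and state[i + 1][j] == 1:
--                 return False
--     return True
-- ===== Notes on version B (the rewrite author's own statement) =====
-- stated objective: simpler
-- what changed: Instead of checking all four neighbours of every talking cell (each adjacency 4x), B makes two plain passes over edges: consecutive cells in each row, then vertically consecutive cells in each column, each adjacency checked once.
-- outside the precondition, e.g. on valid_state([[1], [1]], 2, 2): A returns False, B raises IndexError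
import Mathlib
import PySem

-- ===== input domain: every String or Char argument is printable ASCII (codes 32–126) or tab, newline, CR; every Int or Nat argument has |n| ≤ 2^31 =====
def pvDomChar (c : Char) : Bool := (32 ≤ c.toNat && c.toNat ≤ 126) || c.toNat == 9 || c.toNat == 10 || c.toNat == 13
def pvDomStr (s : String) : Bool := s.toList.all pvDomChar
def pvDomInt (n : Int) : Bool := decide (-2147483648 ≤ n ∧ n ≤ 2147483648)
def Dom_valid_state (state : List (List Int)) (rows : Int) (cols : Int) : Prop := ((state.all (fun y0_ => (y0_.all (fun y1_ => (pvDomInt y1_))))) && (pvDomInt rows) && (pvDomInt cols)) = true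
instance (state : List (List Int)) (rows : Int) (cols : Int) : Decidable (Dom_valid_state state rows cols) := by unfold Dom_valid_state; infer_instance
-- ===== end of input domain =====

-- B replaces A's 4-neighbour probe at every talking cell by two edge passes
-- (consecutive columns, then consecutive rows), checking each adjacency once;
-- objective: simpler.

-- shared helper: state[i][j] (in range under Pre_valid_state)
def pvCell (state : List (List Int)) (i j : Int) : Int :=
  PySem.List.pyGetD (PySem.List.pyGetD state i ([] : List Int)) j 0

-- ===== PORT A =====
def valid_state (state : List (List Int)) (rows : Int) (cols : Int) : Bool :=
  -- early 'return False' = short-circuiting List.all over the same loops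
  (PySem.List.pyRange 0 rows 1).all (fun i =>
    (PySem.List.pyRange 0 cols 1).all (fun j =>
      if pvCell state i j = 1 then
        ([((-1 : Int), (0 : Int)), (1, 0), (0, -1), (0, 1)]).all (fun d =>
          !(decide (0 ≤ i + d.1) && decide (i + d.1 < rows) &&
            decide (0 ≤ j + d.2) && decide (j + d.2 < cols) &&
            decide (pvCell state (i + d.1) (j + d.2) = 1)))
      else true))

-- ===== PORT B =====
def valid_state_alt (state : List (List Int)) (rows : Int) (cols : Int) : Bool :=
  -- horizontal pass over consecutive columns, then vertical pass over consecutive rows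
  ((PySem.List.pyRange 0 rows 1).all (fun i =>
      (PySem.List.pyRange 0 (cols - 1) 1).all (fun j =>
        !(decide (pvCell state i j = 1) && decide (pvCell state i (j + 1) = 1))))) &&
  ((PySem.List.pyRange 0 (rows - 1) 1).all (fun i =>
      (PySem.List.pyRange 0 cols 1).all (fun j =>
        !(decide (pvCell state i j = 1) && decide (pvCell state (i + 1) j = 1)))))

-- ===== PRECONDITION & SPEC =====
-- Pre_ excludes inputs where the grid is smaller than rows×cols, on which the
-- indexing state[i][j] can raise IndexError (A may also still return False
-- early on some of these; B's different traversal order raises there instead).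
def Pre_valid_state (state : List (List Int)) (rows : Int) (cols : Int) : Prop :=
  rows ≤ (state.length : Int) ∧ ∀ r ∈ state.take rows.toNat, cols ≤ (r.length : Int)
instance (state : List (List Int)) (rows : Int) (cols : Int) : Decidable (Pre_valid_state state rows cols) := by unfold Pre_valid_state; infer_instance

def pvWitness_valid_state : List (List Int) × Int × Int := ([[0, 1], [1, 0]], 2, 2)

def Spec_valid_state (state : List (List Int)) (rows : Int) (cols : Int) (out : Bool) : Prop := out = valid_state_alt state rows cols
instance (state : List (List Int)) (rows : Int) (cols : Int) (out : Bool) : Decidable (Spec_valid_state state rows cols out) := by unfold Spec_valid_state; infer_instance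

-- ===== CLAIM (what is proved, stated in full; the proofs are below) =====
def Claim_equal_valid_state : Prop := ∀ (state : List (List Int)) (rows : Int) (cols : Int), Dom_valid_state state rows cols → Pre_valid_state state rows cols → Spec_valid_state state rows cols (valid_state state rows cols)

-- ===== LEMMAS AND PROOFS =====

lemma valid_state_true_iff (state : List (List Int)) (rows cols : Int) :
    valid_state state rows cols = true ↔
      ∀ i, 0 ≤ i → i < rows → ∀ j, 0 ≤ j → j < cols →
        ¬pvCell state i j = 1 ∨
          ((((i < 1 ∨ rows < i) ∨ j < 0) ∨ cols ≤ j) ∨ ¬pvCell state (i + -1) j = 1) ∧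
          ((((i + 1 < 0 ∨ rows ≤ i + 1) ∨ j < 0) ∨ cols ≤ j) ∨ ¬pvCell state (i + 1) j = 1) ∧
          ((((i < 0 ∨ rows ≤ i) ∨ j < 1) ∨ cols < j) ∨ ¬pvCell state i (j + -1) = 1) ∧
          ((((i < 0 ∨ rows ≤ i) ∨ j + 1 < 0) ∨ cols ≤ j + 1) ∨ ¬pvCell state i (j + 1) = 1) := by
  simp [valid_state, List.all_eq_true, PySem.List.mem_pyRange_one]

lemma valid_state_alt_true_iff (state : List (List Int)) (rows cols : Int) :
    valid_state_alt state rows cols = true ↔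
      (∀ i, 0 ≤ i → i < rows → ∀ j, 0 ≤ j → j < cols - 1 →
          ¬pvCell state i j = 1 ∨ ¬pvCell state i (j + 1) = 1) ∧
      (∀ i, 0 ≤ i → i < rows - 1 → ∀ j, 0 ≤ j → j < cols →
          ¬pvCell state i j = 1 ∨ ¬pvCell state (i + 1) j = 1) := by
  simp [valid_state_alt, List.all_eq_true, PySem.List.mem_pyRange_one]

-- ===== VERDICT (by name: the statement is the Claim_ definition above) =====
theorem valid_state_spec : Claim_equal_valid_state := by
  intro state rows cols _ _
  unfold Spec_valid_state
  rw [Bool.eq_iff_iff, valid_state_true_iff, valid_state_alt_true_iff]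
  constructor
  · intro h
    refine ⟨?_, ?_⟩
    · intro i hi1 hi2 j hj1 hj2
      rcases h i hi1 hi2 j hj1 (by omega) with hc | ⟨_, _, _, c4⟩
      · exact Or.inl hc
      · rcases c4 with hb | hn
        · exact absurd hb (by omega)
        · exact Or.inr hn
    · intro i hi1 hi2 j hj1 hj2
      rcases h i hi1 (by omega) j hj1 hj2 with hc | ⟨_, c2, _, _⟩
      · exact Or.inl hc
      · rcases c2 with hb | hn
        · exact absurd hb (by omega)
        · exact Or.inr hn
  · rintro ⟨hh, hv⟩ i hi1 hi2 j hj1 hj2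
    by_cases hc : pvCell state i j = 1
    · refine Or.inr ⟨?_, ?_, ?_, ?_⟩
      · by_cases h1 : i < 1
        · exact Or.inl (by omega)
        · refine Or.inr ?_
          rcases hv (i + -1) (by omega) (by omega) j hj1 hj2 with hn | hn
          · exact hn
          · have e : i + -1 + 1 = i := by ring
            rw [e] at hn; exact absurd hc hn
      · by_cases h1 : rows ≤ i + 1
        · exact Or.inl (by omega)
        · refine Or.inr ?_
          rcases hv i hi1 (by omega) j hj1 hj2 with hn | hn
          · exact absurd hc hn
          · exact hn
      · by_cases h1 : j < 1
        · exact Or.inl (by omega)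
        · refine Or.inr ?_
          rcases hh i hi1 hi2 (j + -1) (by omega) (by omega) with hn | hn
          · exact hn
          · have e : j + -1 + 1 = j := by ring
            rw [e] at hn; exact absurd hc hn
      · by_cases h1 : cols ≤ j + 1
        · exact Or.inl (by omega)
        · refine Or.inr ?_
          rcases hh i hi1 hi2 j hj1 (by omega) with hn | hn
          · exact absurd hc hn
          · exact hn
    · exact Or.inl hc
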